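-- pv_equiv track=rewrite | github.com/hdlldh/leetcode_python | leetcode/editor/en/[1181]Before and After Puzzle.py | beforeAndAfterPuzzles
-- ===== SOURCE A (Python) =====
-- import collections
--
-- def beforeAndAfterPuzzles(phrases):
--     """
--     :type phrases: List[str]
--     :rtype: List[str]
--     """
--     heads = collections.defaultdict(set)
--     tails = collections.defaultdict(set)
--     ans = set()
--     for p in phrases:
--         words = p.split(" ")
--         head = words[0]
--         tail = words[-1]
--         for a in tails[head]:
--             ans.add(a+p[len(head):])
--         for a in heads[tail]:
--             ans.add(p+a)
--         heads[head].add(p[len(head):])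
--         tails[tail].add(p)
--     return sorted(list(ans))
-- ===== SOURCE B (Python) =====
-- def beforeAndAfterPuzzles(phrases):
--     """
--     :type phrases: List[str]
--     :rtype: List[str]
--     """
--     n = len(phrases)
--     res = set()
--     for i in range(n):
--         ti = phrases[i].split(" ")[-1]
--         for j in range(n):
--             if i != j:
--                 head = phrases[j].split(" ")[0]
--                 if ti == head:
--                     res.add(phrases[i] + phrases[j][len(head):])
--     return sorted(res)
-- ===== Notes on version B (the rewrite author's own statement) =====
-- stated objective: simpler
-- what changed: B replaces A's incremental defaultdict-of-sets head/tail index with a plain double loop over all index pairs (i, j), i != j, testing last-word(phrases[i]) == first-word(phrases[j]) directly and collecting phrases[i] + phrases[j][len(first word):] into one set.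
import Mathlib
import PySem

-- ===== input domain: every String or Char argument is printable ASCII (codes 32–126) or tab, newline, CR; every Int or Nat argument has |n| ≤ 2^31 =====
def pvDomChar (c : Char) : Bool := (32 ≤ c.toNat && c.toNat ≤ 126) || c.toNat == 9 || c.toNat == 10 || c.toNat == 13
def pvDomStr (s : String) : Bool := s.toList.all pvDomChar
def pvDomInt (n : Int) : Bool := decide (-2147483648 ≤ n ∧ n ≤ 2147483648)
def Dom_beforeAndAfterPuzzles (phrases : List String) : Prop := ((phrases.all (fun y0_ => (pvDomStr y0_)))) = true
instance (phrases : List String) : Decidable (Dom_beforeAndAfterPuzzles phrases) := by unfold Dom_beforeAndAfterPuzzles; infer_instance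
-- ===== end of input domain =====

-- B replaces A's incremental defaultdict head/tail index with a plain double loop over all
-- index pairs (i, j), i ≠ j (objective: simpler; not faster).

-- ===== PORT A =====
-- Python 'a + b' on strings, ported by hand through the List Char bridge (exact: code-point concatenation).
def pvCat (a b : String) : String := String.ofList (a.toList ++ b.toList)

-- the body of A's 'for p in phrases' loop (state = (heads, tails, ans))
def pvStepA (st : PySem.Dict String (PySem.Set String) × PySem.Dict String (PySem.Set String) × PySem.Set String)
    (p : String) :
    PySem.Dict String (PySem.Set String) × PySem.Dict String (PySem.Set String) × PySem.Set String :=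
  let heads := st.1
  let tails := st.2.1
  let ans := st.2.2
  let words := (PySem.Str.split? p " ").getD []
  let head := PySem.List.pyGetD words 0 ""
  let tail := PySem.List.pyGetD words (-1) ""
  let tails := tails.setdefault head []          -- defaultdict read creates the entry
  let ans := (tails.getD head []).foldl
      (fun ans a => PySem.Set.add ans (pvCat a (PySem.Str.slice p (some (PySem.Str.len head)) none))) ans
  let heads := heads.setdefault tail []          -- defaultdict read creates the entry
  let ans := (heads.getD tail []).foldl (fun ans a => PySem.Set.add ans (pvCat p a)) ans
  let heads := heads.modify head []
      (fun s => PySem.Set.add s (PySem.Str.slice p (some (PySem.Str.len head)) none))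
  let tails := tails.modify tail [] (fun s => PySem.Set.add s p)
  (heads, tails, ans)

def beforeAndAfterPuzzles (phrases : List String) : List String :=
  let st := phrases.foldl pvStepA (PySem.Dict.empty, PySem.Dict.empty, PySem.Set.empty)
  PySem.List.sorted st.2.2 (fun x => x) false

-- ===== PORT B =====
def beforeAndAfterPuzzles_alt (phrases : List String) : List String :=
  let n := PySem.List.len phrases
  let res := (PySem.List.pyRange 0 n 1).foldl (fun res i =>
    let pi := PySem.List.pyGetD phrases i ""
    let ti := PySem.List.pyGetD ((PySem.Str.split? pi " ").getD []) (-1) ""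
    (PySem.List.pyRange 0 n 1).foldl (fun res j =>
      if i ≠ j then
        let pj := PySem.List.pyGetD phrases j ""
        let head := PySem.List.pyGetD ((PySem.Str.split? pj " ").getD []) 0 ""
        if ti = head then
          PySem.Set.add res (pvCat pi (PySem.Str.slice pj (some (PySem.Str.len head)) none))
        else res
      else res) res) (PySem.Set.empty : PySem.Set String)
  PySem.List.sorted res (fun x => x) false

-- ===== PRECONDITION & SPEC =====
def Spec_beforeAndAfterPuzzles (phrases : List String) (out : List String) : Prop := out = beforeAndAfterPuzzles_alt phrases
instance (phrases : List String) (out : List String) : Decidable (Spec_beforeAndAfterPuzzles phrases out) := by unfold Spec_beforeAndAfterPuzzles; infer_instance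

-- ===== CLAIM (what is proved, stated in full; the proofs are below) =====
def Claim_equal_beforeAndAfterPuzzles : Prop := ∀ (phrases : List String), Dom_beforeAndAfterPuzzles phrases → Spec_beforeAndAfterPuzzles phrases (beforeAndAfterPuzzles phrases)

-- ===== LEMMAS AND PROOFS =====

-- first word, last word, the tail slice, and the combined phrase
def pvFw (p : String) : String := PySem.List.pyGetD ((PySem.Str.split? p " ").getD []) 0 ""
def pvLw (p : String) : String := PySem.List.pyGetD ((PySem.Str.split? p " ").getD []) (-1) ""
def pvSfx (p : String) : String := PySem.Str.slice p (some (PySem.Str.len (pvFw p))) none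
def pvCmb (a b : String) : String := pvCat a (pvSfx b)

-- the set both programs collect, as a predicate
def pvPair (phrases : List String) (s : String) : Prop :=
  ∃ (i j : Nat), ∃ (hi : i < phrases.length) (hj : j < phrases.length),
    i ≠ j ∧ pvLw phrases[i] = pvFw phrases[j] ∧ s = pvCmb phrases[i] phrases[j]

lemma pv_getElem_concat {α : Type} (pre : List α) (p : α) (h : pre.length < (pre ++ [p]).length) :
    (pre ++ [p])[pre.length]'h = p := by simp

lemma pv_nodup_foldl_add {α : Type} (l : List α) (f : α → String) (s : PySem.Set String)
    (h : s.Nodup) : (l.foldl (fun s b => PySem.Set.add s (f b)) s).Nodup := by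
  induction l generalizing s with
  | nil => exact h
  | cons a t ih => exact ih _ (PySem.Set.nodup_add _ _ h)

lemma pv_getD_setdefault_nil (d : PySem.Dict String (PySem.Set String)) (k k' : String) :
    (d.setdefault k []).getD k' [] = d.getD k' [] := by
  by_cases hk : k' = k
  · subst hk; exact PySem.Dict.getD_setdefault_self d k' [] []
  · rw [PySem.Dict.getD_eq_get?_getD, PySem.Dict.get?_setdefault_of_ne d [] hk,
      ← PySem.Dict.getD_eq_get?_getD]

lemma pv_exists_append_singleton (pre : List String) (p : String) (Q : String → Prop) :
    (∃ (i : Nat), ∃ (_ : i < (pre ++ [p]).length), Q (pre ++ [p])[i]) ↔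
      (∃ (i : Nat), ∃ (_ : i < pre.length), Q pre[i]) ∨ Q p := by
  constructor
  · rintro ⟨i, hi, hQ⟩
    rcases lt_or_ge i pre.length with h | h
    · exact Or.inl ⟨i, h, by rwa [List.getElem_append_left h] at hQ⟩
    · have hie : i = pre.length := by simp at hi; omega
      subst hie
      exact Or.inr (by rwa [pv_getElem_concat] at hQ)
  · rintro (⟨i, hi, hQ⟩ | hQ)
    · exact ⟨i, by simp; omega, by rwa [List.getElem_append_left hi]⟩
    · exact ⟨pre.length, by simp, by rwa [pv_getElem_concat]⟩

lemma pvPair_append_singleton (pre : List String) (p : String) (s : String) :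
    pvPair (pre ++ [p]) s ↔ pvPair pre s ∨
      (∃ (i : Nat), ∃ (_ : i < pre.length), pvLw pre[i] = pvFw p ∧ s = pvCmb pre[i] p) ∨
      (∃ (i : Nat), ∃ (_ : i < pre.length), pvLw p = pvFw pre[i] ∧ s = pvCmb p pre[i]) := by
  unfold pvPair
  constructor
  · rintro ⟨i, j, hi, hj, hne, hm, hs⟩
    have hi' : i < pre.length + 1 := by simpa using hi
    have hj' : j < pre.length + 1 := by simpa using hj
    rcases lt_or_ge i pre.length with h1 | h1 <;> rcases lt_or_ge j pre.length with h2 | h2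
    · refine Or.inl ⟨i, j, h1, h2, hne, ?_, ?_⟩
      · rwa [List.getElem_append_left h1, List.getElem_append_left h2] at hm
      · rwa [List.getElem_append_left h1, List.getElem_append_left h2] at hs
    · have hje : j = pre.length := by omega
      subst hje
      refine Or.inr (Or.inl ⟨i, h1, ?_, ?_⟩)
      · rwa [List.getElem_append_left h1, pv_getElem_concat] at hm
      · rwa [List.getElem_append_left h1, pv_getElem_concat] at hs
    · have hie : i = pre.length := by omega
      subst hie
      refine Or.inr (Or.inr ⟨j, h2, ?_, ?_⟩)
      · rwa [pv_getElem_concat, List.getElem_append_left h2] at hm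
      · rwa [pv_getElem_concat, List.getElem_append_left h2] at hs
    · omega
  · have hlen : pre.length < (pre ++ [p]).length := by simp
    rintro (⟨i, j, hi, hj, hne, hm, hs⟩ | ⟨i, hi, hm, hs⟩ | ⟨i, hi, hm, hs⟩)
    · refine ⟨i, j, by simp; omega, by simp; omega, hne, ?_, ?_⟩
      · rwa [List.getElem_append_left hi, List.getElem_append_left hj]
      · rwa [List.getElem_append_left hi, List.getElem_append_left hj]
    · refine ⟨i, pre.length, by simp; omega, hlen, by omega, ?_, ?_⟩
      · rwa [List.getElem_append_left hi, pv_getElem_concat]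
      · rwa [List.getElem_append_left hi, pv_getElem_concat]
    · refine ⟨pre.length, i, hlen, by simp; omega, by omega, ?_, ?_⟩
      · rwa [pv_getElem_concat, List.getElem_append_left hi]
      · rwa [pv_getElem_concat, List.getElem_append_left hi]

-- the A-side loop invariant
def pvInvA (pre : List String)
    (st : PySem.Dict String (PySem.Set String) × PySem.Dict String (PySem.Set String) × PySem.Set String) : Prop :=
  (∀ h x, x ∈ st.1.getD h [] ↔ ∃ (i : Nat), ∃ (_ : i < pre.length), pvFw pre[i] = h ∧ x = pvSfx pre[i]) ∧
  (∀ h x, x ∈ st.2.1.getD h [] ↔ ∃ (i : Nat), ∃ (_ : i < pre.length), pvLw pre[i] = h ∧ x = pre[i]) ∧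
  (∀ s, s ∈ st.2.2 ↔ pvPair pre s) ∧ st.2.2.Nodup

-- A's loop body, re-expressed through the word helpers (definitional)
lemma pvStepA_eq (st : PySem.Dict String (PySem.Set String) × PySem.Dict String (PySem.Set String) × PySem.Set String)
    (p : String) : pvStepA st p =
    ((st.1.setdefault (pvLw p) []).modify (pvFw p) [] (fun s => PySem.Set.add s (pvSfx p)),
     (st.2.1.setdefault (pvFw p) []).modify (pvLw p) [] (fun s => PySem.Set.add s p),
     (((st.1.setdefault (pvLw p) []).getD (pvLw p) []).foldl (fun ans a => PySem.Set.add ans (pvCat p a))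
       (((st.2.1.setdefault (pvFw p) []).getD (pvFw p) []).foldl
         (fun ans a => PySem.Set.add ans (pvCat a (pvSfx p))) st.2.2))) := rfl

lemma pvStepA_inv (pre : List String) (p : String)
    (st : PySem.Dict String (PySem.Set String) × PySem.Dict String (PySem.Set String) × PySem.Set String)
    (h : pvInvA pre st) : pvInvA (pre ++ [p]) (pvStepA st p) := by
  obtain ⟨hH, hT, hA, hN⟩ := h
  rw [pvStepA_eq]
  refine ⟨?_, ?_, ?_, ?_⟩
  · intro h x
    rw [PySem.Dict.getD_modify,
      pv_exists_append_singleton pre p (fun y => pvFw y = h ∧ x = pvSfx y)]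
    split_ifs with hc
    · rw [pv_getD_setdefault_nil, PySem.Set.mem_add, hH]
      subst hc
      constructor
      · rintro (⟨i, hi, h1, h2⟩ | hx)
        · exact Or.inl ⟨i, hi, h1, h2⟩
        · exact Or.inr ⟨rfl, hx⟩
      · rintro (⟨i, hi, h1, h2⟩ | ⟨_, hx⟩)
        · exact Or.inl ⟨i, hi, h1, h2⟩
        · exact Or.inr hx
    · rw [pv_getD_setdefault_nil, hH]
      constructor
      · exact fun ⟨i, hi, h1, h2⟩ => Or.inl ⟨i, hi, h1, h2⟩
      · rintro (⟨i, hi, h1, h2⟩ | ⟨h1, _⟩)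
        · exact ⟨i, hi, h1, h2⟩
        · exact absurd h1.symm hc
  · intro h x
    rw [PySem.Dict.getD_modify,
      pv_exists_append_singleton pre p (fun y => pvLw y = h ∧ x = y)]
    split_ifs with hc
    · rw [pv_getD_setdefault_nil, PySem.Set.mem_add, hT]
      subst hc
      constructor
      · rintro (⟨i, hi, h1, h2⟩ | hx)
        · exact Or.inl ⟨i, hi, h1, h2⟩
        · exact Or.inr ⟨rfl, hx⟩
      · rintro (⟨i, hi, h1, h2⟩ | ⟨_, hx⟩)
        · exact Or.inl ⟨i, hi, h1, h2⟩
        · exact Or.inr hx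
    · rw [pv_getD_setdefault_nil, hT]
      constructor
      · exact fun ⟨i, hi, h1, h2⟩ => Or.inl ⟨i, hi, h1, h2⟩
      · rintro (⟨i, hi, h1, h2⟩ | ⟨h1, _⟩)
        · exact ⟨i, hi, h1, h2⟩
        · exact absurd h1.symm hc
  · intro s
    rw [PySem.Set.mem_foldl_add, PySem.Set.mem_foldl_add, pv_getD_setdefault_nil,
      pv_getD_setdefault_nil, pvPair_append_singleton]
    constructor
    · rintro ((hs | ⟨a, ha, rfl⟩) | ⟨a, ha, rfl⟩)
      · exact Or.inl ((hA s).1 hs)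
      · obtain ⟨i, hi, h1, rfl⟩ := (hT _ a).1 ha
        exact Or.inr (Or.inl ⟨i, hi, h1, rfl⟩)
      · obtain ⟨i, hi, h1, rfl⟩ := (hH _ a).1 ha
        exact Or.inr (Or.inr ⟨i, hi, h1.symm ▸ rfl, rfl⟩)
    · rintro (hs | ⟨i, hi, h1, rfl⟩ | ⟨i, hi, h1, rfl⟩)
      · exact Or.inl (Or.inl ((hA s).2 hs))
      · exact Or.inl (Or.inr ⟨pre[i], (hT _ _).2 ⟨i, hi, h1, rfl⟩, rfl⟩)
      · exact Or.inr ⟨pvSfx pre[i], (hH _ _).2 ⟨i, hi, h1.symm, rfl⟩, rfl⟩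
  · exact pv_nodup_foldl_add _ _ _ (pv_nodup_foldl_add _ _ _ hN)

lemma pvInvA_holds (phrases : List String) :
    pvInvA phrases (phrases.foldl pvStepA (PySem.Dict.empty, PySem.Dict.empty, PySem.Set.empty)) := by
  induction phrases using List.reverseRecOn with
  | nil =>
    refine ⟨?_, ?_, ?_, List.nodup_nil⟩ <;>
      simp [PySem.Dict.getD_empty, pvPair, PySem.Set.empty]
  | append_singleton pre p ih =>
    rw [List.foldl_append, List.foldl_cons, List.foldl_nil]
    exact pvStepA_inv pre p _ ih

-- B-side: membership and nodup through a fold whose step adds at most one element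
lemma pv_mem_foldl_of_step {α : Type} (l : List α) (F : PySem.Set String → α → PySem.Set String)
    (Q : α → String → Prop) (hF : ∀ s x y, y ∈ F s x ↔ y ∈ s ∨ Q x y) :
    ∀ (s0 : PySem.Set String) (y : String), y ∈ l.foldl F s0 ↔ y ∈ s0 ∨ ∃ x ∈ l, Q x y := by
  induction l with
  | nil => simp
  | cons a t ih =>
    intro s0 y
    rw [List.foldl_cons, ih, hF]
    constructor
    · rintro ((h | h) | ⟨x, hx, h⟩)
      · exact Or.inl h
      · exact Or.inr ⟨a, by simp, h⟩
      · exact Or.inr ⟨x, by simp [hx], h⟩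
    · rintro (h | ⟨x, hx, h⟩)
      · exact Or.inl (Or.inl h)
      · rcases List.mem_cons.1 hx with rfl | hx
        · exact Or.inl (Or.inr h)
        · exact Or.inr ⟨x, hx, h⟩

lemma pv_nodup_foldl_of_step {α : Type} (l : List α) (F : PySem.Set String → α → PySem.Set String)
    (hF : ∀ s x, s.Nodup → (F s x).Nodup) :
    ∀ (s0 : PySem.Set String), s0.Nodup → (l.foldl F s0).Nodup := by
  induction l with
  | nil => exact fun s0 h => h
  | cons a t ih => exact fun s0 h => ih _ (hF _ _ h)

-- the inner loop body of B, membership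
lemma pvB_inner_mem (i j : Int) (phrases : List String) (res : PySem.Set String) (y : String) :
    (y ∈ (if i ≠ j then
        (if PySem.List.pyGetD ((PySem.Str.split? (PySem.List.pyGetD phrases i "") " ").getD []) (-1) "" =
            PySem.List.pyGetD ((PySem.Str.split? (PySem.List.pyGetD phrases j "") " ").getD []) 0 "" then
          PySem.Set.add res (pvCat (PySem.List.pyGetD phrases i "")
            (PySem.Str.slice (PySem.List.pyGetD phrases j "")
              (some (PySem.Str.len (PySem.List.pyGetD ((PySem.Str.split? (PySem.List.pyGetD phrases j "") " ").getD []) 0 ""))) none))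
        else res)
      else res)) ↔
      y ∈ res ∨ (i ≠ j ∧ pvLw (PySem.List.pyGetD phrases i "") = pvFw (PySem.List.pyGetD phrases j "") ∧
        y = pvCmb (PySem.List.pyGetD phrases i "") (PySem.List.pyGetD phrases j "")) := by
  split_ifs with h1 h2
  · rw [PySem.Set.mem_add]
    constructor
    · rintro (h | rfl)
      · exact Or.inl h
      · exact Or.inr ⟨h1, h2, rfl⟩
    · rintro (h | ⟨_, _, rfl⟩)
      · exact Or.inl h
      · exact Or.inr rfl
  · constructor
    · exact Or.inl
    · rintro (h | ⟨_, hm, _⟩)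
      · exact h
      · exact absurd hm h2
  · constructor
    · exact Or.inl
    · rintro (h | ⟨hne, _, _⟩)
      · exact h
      · exact absurd hne h1

-- characterisation of B's collected set
lemma pvB_char (phrases : List String) (s : String) :
    (s ∈ (PySem.List.pyRange 0 (PySem.List.len phrases) 1).foldl (fun res i =>
      (PySem.List.pyRange 0 (PySem.List.len phrases) 1).foldl (fun res j =>
        if i ≠ j then
          if PySem.List.pyGetD ((PySem.Str.split? (PySem.List.pyGetD phrases i "") " ").getD []) (-1) "" =
              PySem.List.pyGetD ((PySem.Str.split? (PySem.List.pyGetD phrases j "") " ").getD []) 0 "" then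
            PySem.Set.add res (pvCat (PySem.List.pyGetD phrases i "")
              (PySem.Str.slice (PySem.List.pyGetD phrases j "")
                (some (PySem.Str.len (PySem.List.pyGetD ((PySem.Str.split? (PySem.List.pyGetD phrases j "") " ").getD []) 0 ""))) none))
          else res
        else res) res) (PySem.Set.empty : PySem.Set String)) ↔ pvPair phrases s := by
  rw [pv_mem_foldl_of_step _ _
      (fun i y => ∃ j ∈ PySem.List.pyRange 0 (PySem.List.len phrases) 1,
        i ≠ j ∧ pvLw (PySem.List.pyGetD phrases i "") = pvFw (PySem.List.pyGetD phrases j "") ∧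
          y = pvCmb (PySem.List.pyGetD phrases i "") (PySem.List.pyGetD phrases j ""))
      (fun res i y => pv_mem_foldl_of_step _ _
        (fun j y => i ≠ j ∧ pvLw (PySem.List.pyGetD phrases i "") = pvFw (PySem.List.pyGetD phrases j "") ∧
          y = pvCmb (PySem.List.pyGetD phrases i "") (PySem.List.pyGetD phrases j ""))
        (fun res j y => pvB_inner_mem i j phrases res y) res y)]
  have hlen : PySem.List.len phrases = (phrases.length : Int) := by
    simp [PySem.List.len]
  constructor
  · rintro (h | ⟨i, hi, j, hj, hne, hm, rfl⟩)
    · simp [PySem.Set.empty] at h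
    · rw [PySem.List.mem_pyRange_one, hlen] at hi hj
      have h0i : (0:Int) ≤ i := hi.1
      have h0j : (0:Int) ≤ j := hj.1
      rw [PySem.List.pyGetD_eq_getElem phrases "" h0i hi.2,
        PySem.List.pyGetD_eq_getElem phrases "" h0j hj.2] at hm ⊢
      exact ⟨i.toNat, j.toNat, by omega, by omega, by omega, hm, rfl⟩
  · rintro ⟨i, j, hi, hj, hne, hm, rfl⟩
    refine Or.inr ⟨(i : Int), ?_, (j : Int), ?_, by omega, ?_, ?_⟩
    · rw [PySem.List.mem_pyRange_one, hlen]; omega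
    · rw [PySem.List.mem_pyRange_one, hlen]; omega
    · rw [PySem.List.pyGetD_eq_getElem phrases "" (by omega) (by simpa using hi),
        PySem.List.pyGetD_eq_getElem phrases "" (by omega) (by simpa using hj)]
      simpa using hm
    · rw [PySem.List.pyGetD_eq_getElem phrases "" (by omega) (by simpa using hi),
        PySem.List.pyGetD_eq_getElem phrases "" (by omega) (by simpa using hj)]
      simp

lemma pvB_nodup (phrases : List String) :
    ((PySem.List.pyRange 0 (PySem.List.len phrases) 1).foldl (fun res i =>
      (PySem.List.pyRange 0 (PySem.List.len phrases) 1).foldl (fun res j =>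
        if i ≠ j then
          if PySem.List.pyGetD ((PySem.Str.split? (PySem.List.pyGetD phrases i "") " ").getD []) (-1) "" =
              PySem.List.pyGetD ((PySem.Str.split? (PySem.List.pyGetD phrases j "") " ").getD []) 0 "" then
            PySem.Set.add res (pvCat (PySem.List.pyGetD phrases i "")
              (PySem.Str.slice (PySem.List.pyGetD phrases j "")
                (some (PySem.Str.len (PySem.List.pyGetD ((PySem.Str.split? (PySem.List.pyGetD phrases j "") " ").getD []) 0 ""))) none))
          else res
        else res) res) (PySem.Set.empty : PySem.Set String)).Nodup := by
  refine pv_nodup_foldl_of_step _ _ (fun s i h => ?_) _ List.nodup_nil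
  refine pv_nodup_foldl_of_step _ _ (fun s j h => ?_) _ h
  split_ifs with h1 h2
  · exact PySem.Set.nodup_add _ _ h
  · exact h
  · exact h

-- ===== VERDICT (by name: the statement is the Claim_ definition above) =====
theorem beforeAndAfterPuzzles_spec : Claim_equal_beforeAndAfterPuzzles := by
  intro phrases _
  unfold Spec_beforeAndAfterPuzzles beforeAndAfterPuzzles beforeAndAfterPuzzles_alt
  refine PySem.List.sorted_eq_sorted_of_perm _ _ _ (fun a b h => h) ?_
  rw [List.perm_ext_iff_of_nodup (pvInvA_holds phrases).2.2.2 (pvB_nodup phrases)]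
  intro a
  rw [(pvInvA_holds phrases).2.2.1 a, ← pvB_char phrases a]
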